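-- pv_equiv track=rewrite | github.com/SimplyGenius-svg/mano-backend | src/helpers/urgency_scorer.py | score_urgency
-- ===== SOURCE A (Python) =====
-- def score_urgency(email_body, tone="neutral"):
--     """
--     Score urgency of an email based on language and tone.
--     Returns an integer between 0 and 10.
--     0 = no urgency (backlog)
--     10 = extreme urgency (critical immediate)
--     """
--     body = email_body.lower()
--
--     urgency = 0  # Default to no urgency
--
--     # Step 1: Keyword detection
--     if any(word in body for word in ["immediately", "asap", "urgent", "critical", "eod", "right away", "now"]):
--         urgency = 9
--     elif any(word in body for word in ["today", "by tonight", "in a few hours", "end of day", "this afternoon"]):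
--         urgency = 7
--     elif any(word in body for word in ["tomorrow", "next day", "soon"]):
--         urgency = 5
--     elif any(word in body for word in ["this week", "early next week", "upcoming"]):
--         urgency = 3
--     elif any(word in body for word in ["next month", "whenever", "no rush"]):
--         urgency = 1
--
--     # Step 2: Tone adjustment
--     if tone.lower() in ["frustrated", "concerned", "angry", "anxious"]:
--         urgency = min(urgency + 1, 10)
--
--     return urgency
-- ===== SOURCE B (Python) =====
-- # Flat keyword -> score map; urgency is the MAX score over all matching keywords
-- # (correct because tier scores are distinct and the cascade picks the highest-scoring tier).
-- _KEYWORD_SCORES = {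
--     "immediately": 9, "asap": 9, "urgent": 9, "critical": 9, "eod": 9,
--     "right away": 9, "now": 9,
--     "today": 7, "by tonight": 7, "in a few hours": 7, "end of day": 7,
--     "this afternoon": 7,
--     "tomorrow": 5, "next day": 5, "soon": 5,
--     "this week": 3, "early next week": 3, "upcoming": 3,
--     "next month": 1, "whenever": 1, "no rush": 1,
-- }
--
--
-- def score_urgency(email_body, tone="neutral"):
--     body = email_body.lower()
--     urgency = max((s for kw, s in _KEYWORD_SCORES.items() if kw in body), default=0)
--     if tone.lower() in ["frustrated", "concerned", "angry", "anxious"]: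
--         urgency = min(urgency + 1, 10)
--     return urgency
-- ===== Notes on version B (the rewrite author's own statement) =====
-- stated objective: alternative
-- what changed: Replaces A's ordered five-branch elif cascade with a flat keyword-to-score map and a single max over all matching keywords (no priority ordering or early exit needed, since the highest matching score is what the cascade returns).
import Mathlib
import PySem

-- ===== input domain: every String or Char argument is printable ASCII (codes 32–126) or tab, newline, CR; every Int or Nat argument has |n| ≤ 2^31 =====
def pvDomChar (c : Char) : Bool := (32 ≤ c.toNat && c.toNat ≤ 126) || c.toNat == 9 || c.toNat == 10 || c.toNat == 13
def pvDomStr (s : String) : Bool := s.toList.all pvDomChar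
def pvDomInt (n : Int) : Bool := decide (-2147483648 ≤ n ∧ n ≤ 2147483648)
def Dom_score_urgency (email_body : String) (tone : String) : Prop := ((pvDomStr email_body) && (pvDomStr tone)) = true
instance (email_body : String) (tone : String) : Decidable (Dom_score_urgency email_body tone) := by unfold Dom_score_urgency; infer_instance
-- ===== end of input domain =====

-- B replaces A's ordered elif cascade with a flat keyword→score map and one max over all matching keywords; objective: alternative.

-- ===== PORT A =====
-- literal transliteration of A's elif ladder
def score_urgency (email_body : String) (tone : String) : Int :=
  let body := PySem.Str.lower email_body
  let urgency : Int := 0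
  let urgency :=
    if ["immediately", "asap", "urgent", "critical", "eod", "right away", "now"].any
        (fun word => PySem.Str.isIn word body) then (9 : Int)
    else if ["today", "by tonight", "in a few hours", "end of day", "this afternoon"].any
        (fun word => PySem.Str.isIn word body) then (7 : Int)
    else if ["tomorrow", "next day", "soon"].any
        (fun word => PySem.Str.isIn word body) then (5 : Int)
    else if ["this week", "early next week", "upcoming"].any
        (fun word => PySem.Str.isIn word body) then (3 : Int)
    else if ["next month", "whenever", "no rush"].any
        (fun word => PySem.Str.isIn word body) then (1 : Int)
    else urgency
  if ["frustrated", "concerned", "angry", "anxious"].contains (PySem.Str.lower tone) then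
    min (urgency + 1) 10
  else urgency

-- ===== PORT B =====
-- the flat keyword→score dict of Source B (insertion order)
def pvKeywordScores : List (String × Int) :=
  [ ("immediately", 9), ("asap", 9), ("urgent", 9), ("critical", 9), ("eod", 9),
    ("right away", 9), ("now", 9),
    ("today", 7), ("by tonight", 7), ("in a few hours", 7), ("end of day", 7),
    ("this afternoon", 7),
    ("tomorrow", 5), ("next day", 5), ("soon", 5),
    ("this week", 3), ("early next week", 3), ("upcoming", 3),
    ("next month", 1), ("whenever", 1), ("no rush", 1) ]

-- max((s for kw, s in _KEYWORD_SCORES.items() if kw in body), default=0)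
def score_urgency_alt (email_body : String) (tone : String) : Int :=
  let body := PySem.Str.lower email_body
  let urgency :=
    PySem.List.maxD
      (pvKeywordScores.filterMap (fun p => if PySem.Str.isIn p.1 body then some p.2 else none))
      (fun y => y) 0
  if ["frustrated", "concerned", "angry", "anxious"].contains (PySem.Str.lower tone) then
    min (urgency + 1) 10
  else urgency

-- ===== PRECONDITION & SPEC =====
def Spec_score_urgency (email_body : String) (tone : String) (out : Int) : Prop := out = score_urgency_alt email_body tone
instance (email_body : String) (tone : String) (out : Int) : Decidable (Spec_score_urgency email_body tone out) := by unfold Spec_score_urgency; infer_instance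

-- ===== CLAIM =====
def Claim_equal_score_urgency : Prop := ∀ (email_body : String) (tone : String), Dom_score_urgency email_body tone → Spec_score_urgency email_body tone (score_urgency email_body tone)

-- ===== LEMMAS AND PROOFS =====

-- max(L, default=0) over a list of nonnegative ints is the running-max fold from 0
lemma pv_maxD_eq_foldl (L : List Int) (h : ∀ x ∈ L, 0 ≤ x) :
    PySem.List.maxD L (fun y => y) 0 = L.foldl max 0 := by
  cases L with
  | nil => simp [PySem.List.maxD, PySem.List.max?]
  | cons x t =>
      have hx : (0 : Int) ≤ x := h x (by simp)
      simp [PySem.List.maxD, PySem.List.max?_id_cons, max_eq_right hx]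

-- the matching keywords of a constant-score group contribute a constant list
lemma pv_filterMap_const (body : String) (words : List String) (s : Int) :
    List.filterMap (fun p : String × Int => if PySem.Str.isIn p.1 body then some p.2 else none)
      (words.map (fun w => (w, s)))
    = (words.filter (fun w => PySem.Str.isIn w body)).map (fun _ => s) := by
  induction words with
  | nil => rfl
  | cons w ws ih =>
      simp only [List.map_cons, List.filterMap_cons, List.filter_cons]
      cases hq : PySem.Str.isIn w body
      · simp only [Bool.false_eq_true, reduceIte, ih]
      · simp only [reduceIte, List.map_cons, ih]

-- running max over the constant list a filter produces
lemma pv_foldl_max_const (q : String → Bool) (words : List String) (s acc : Int) :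
    List.foldl max acc ((words.filter q).map (fun _ => s))
    = if words.any q then max acc s else acc := by
  induction words generalizing acc with
  | nil => simp
  | cons w ws ih =>
      simp only [List.filter_cons, List.any_cons]
      by_cases hq : q w = true
      · simp only [hq, reduceIte, List.map_cons, List.foldl_cons, Bool.true_or, ih]
        split
        · rw [max_assoc, max_self]
        · rfl
      · rw [Bool.not_eq_true] at hq
        simp only [hq, Bool.false_eq_true, reduceIte, Bool.false_or, ih]

-- all scores in the map are nonnegative
lemma pv_scores_nonneg : ∀ p ∈ pvKeywordScores, (0 : Int) ≤ p.2 := by decide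

-- B's max-over-matches equals A's cascade value
lemma pv_urgency_eq (body : String) :
    PySem.List.maxD
      (pvKeywordScores.filterMap (fun p => if PySem.Str.isIn p.1 body then some p.2 else none))
      (fun y => y) 0
    =
    (if ["immediately", "asap", "urgent", "critical", "eod", "right away", "now"].any
        (fun word => PySem.Str.isIn word body) then (9 : Int)
    else if ["today", "by tonight", "in a few hours", "end of day", "this afternoon"].any
        (fun word => PySem.Str.isIn word body) then (7 : Int)
    else if ["tomorrow", "next day", "soon"].any
        (fun word => PySem.Str.isIn word body) then (5 : Int)
    else if ["this week", "early next week", "upcoming"].any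
        (fun word => PySem.Str.isIn word body) then (3 : Int)
    else if ["next month", "whenever", "no rush"].any
        (fun word => PySem.Str.isIn word body) then (1 : Int)
    else 0) := by
  have hub : ∀ x ∈ pvKeywordScores.filterMap
      (fun p => if PySem.Str.isIn p.1 body then some p.2 else none), (0 : Int) ≤ x := by
    intro x hx
    rw [List.mem_filterMap] at hx
    obtain ⟨p, hp, heq⟩ := hx
    by_cases hi : PySem.Str.isIn p.1 body = true
    · rw [if_pos hi] at heq
      cases heq
      exact pv_scores_nonneg p hp
    · rw [if_neg hi] at heq
      cases heq
  have hsplit : pvKeywordScores =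
      (["immediately", "asap", "urgent", "critical", "eod", "right away", "now"].map
        (fun w => (w, (9 : Int))))
      ++ (["today", "by tonight", "in a few hours", "end of day", "this afternoon"].map
        (fun w => (w, (7 : Int))))
      ++ (["tomorrow", "next day", "soon"].map (fun w => (w, (5 : Int))))
      ++ (["this week", "early next week", "upcoming"].map (fun w => (w, (3 : Int))))
      ++ (["next month", "whenever", "no rush"].map (fun w => (w, (1 : Int)))) := by rfl
  rw [pv_maxD_eq_foldl _ hub, hsplit]
  rw [List.filterMap_append, List.filterMap_append, List.filterMap_append, List.filterMap_append]
  rw [pv_filterMap_const body, pv_filterMap_const body, pv_filterMap_const body,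
      pv_filterMap_const body, pv_filterMap_const body]
  rw [List.foldl_append, List.foldl_append, List.foldl_append, List.foldl_append]
  rw [pv_foldl_max_const, pv_foldl_max_const, pv_foldl_max_const, pv_foldl_max_const,
      pv_foldl_max_const]
  split_ifs <;> norm_num

-- ===== VERDICT =====
theorem score_urgency_spec : Claim_equal_score_urgency := by
  intro email_body tone _
  unfold Spec_score_urgency
  simp only [score_urgency, score_urgency_alt]
  rw [pv_urgency_eq]
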